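-- pv_equiv track=rewrite | github.com/aoliverg/MTUOC-old | MTUOC/MTUOC_detruecaser.py | detruecase
-- ===== SOURCE A (Python) =====
-- def detruecase(line):
--     tokens=line.split(" ")
--     new=[]
--     yet=False
--     for token in tokens:
--         if not yet and token.isalpha():
--             yet=True
--             new.append(token[0].upper()+token[1:])
--         else:
--             new.append(token)
--     line=" ".join(new)
--     return(line)
-- ===== SOURCE B (Python) =====
-- def detruecase(line):
--     # Scan the raw string token by token with str.find on the separator; never build a token
--     # list, and return immediately once the first alphabetic token is fixed.
--     done = ""
--     rest = line
--     while True: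
--         sp = rest.find(" ")
--         tok = rest if sp < 0 else rest[:sp]
--         if tok.isalpha():
--             fixed = tok[0].upper() + tok[1:]
--             return done + fixed + ("" if sp < 0 else " " + rest[sp + 1:])
--         if sp < 0:
--             return done + tok
--         done += tok + " "
--         rest = rest[sp + 1:]
-- ===== Notes on version B (the rewrite author's own statement) =====
-- stated objective: alternative
-- what changed: B never splits the line into a token list: it scans the raw string with str.find on the separator, consuming one token at a time into an accumulated prefix, and returns immediately (rest of the string verbatim) once the first alphabetic token is capitalized, whereas A splits, rebuilds the whole list under a flag and re-joins.
import Mathlib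
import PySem

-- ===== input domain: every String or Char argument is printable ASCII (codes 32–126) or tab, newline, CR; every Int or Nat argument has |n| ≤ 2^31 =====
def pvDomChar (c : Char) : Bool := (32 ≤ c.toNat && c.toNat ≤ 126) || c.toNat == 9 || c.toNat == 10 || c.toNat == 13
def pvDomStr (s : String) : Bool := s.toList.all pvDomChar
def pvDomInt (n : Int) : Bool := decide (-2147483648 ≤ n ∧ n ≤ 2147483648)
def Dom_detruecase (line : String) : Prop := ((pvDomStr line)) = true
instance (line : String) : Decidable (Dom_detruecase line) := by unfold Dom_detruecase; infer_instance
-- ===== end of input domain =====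

-- B scans the raw string with str.find on the separator, token by token, and returns as soon as the first
-- alphabetic token is capitalized; it never builds a token list ('alternative', not faster).
-- Both ports work on the code-point list (PySem.Chars are the exact definitions).

-- token[0].upper() + token[1:] (both Pythons apply it only to tokens with isalpha() true)
def pvCap (t : List Char) : List Char :=
  match t with
  | [] => []
  | c :: cs => PySem.Chars.upperChar c :: cs

-- ===== PORT A =====
-- the loop over tokens with the 'yet' flag, appending to 'new' in order
def pvLoopA : List (List Char) → Bool → List (List Char)
  | [], _ => []
  | t :: ts, yet =>
    if !yet && PySem.Chars.strIsalpha t then pvCap t :: pvLoopA ts true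
    else t :: pvLoopA ts yet

def detruecase (line : String) : String :=
  String.ofList (PySem.Chars.join [' '] (pvLoopA (PySem.Chars.splitOn line.toList [' ']) false))

-- ===== PORT B =====
-- the while-loop of Source B: 'done' is the processed prefix, 'rest' the remainder;
-- rest.find(" ") < 0 ↔ no space left; slices rest[:sp] / rest[sp+1:] are take/drop (sp in range)
def pvGoB (done rest : List Char) : List Char :=
  let sp := PySem.Chars.find rest [' ']
  let tok := if sp < 0 then rest else rest.take sp.toNat
  if PySem.Chars.strIsalpha tok then
    done ++ pvCap tok ++ (if sp < 0 then [] else ' ' :: rest.drop (sp.toNat + 1))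
  else if h : sp < 0 then done ++ tok
  else pvGoB (done ++ tok ++ [' ']) (rest.drop (sp.toNat + 1))
termination_by rest.length
decreasing_by
  have h0 : (0 : Int) ≤ PySem.Chars.find rest [' '] := by omega
  have hin : [' '] <:+: rest := by
    have := PySem.Chars.find_nonneg_iff (s := rest) (sub := [' '])
    exact this.mp h0
  have hne : rest ≠ [] := by
    rintro rfl
    simp at hin
  simp only [List.length_drop]
  have : 0 < rest.length := List.length_pos_iff.mpr hne
  omega

def detruecase_alt (line : String) : String :=
  String.ofList (pvGoB [] line.toList)

-- ===== PRECONDITION & SPEC =====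
def Spec_detruecase (line : String) (out : String) : Prop := out = detruecase_alt line
instance (line : String) (out : String) : Decidable (Spec_detruecase line out) := by unfold Spec_detruecase; infer_instance

-- ===== CLAIM =====
def Claim_equal_detruecase : Prop := ∀ (line : String), Dom_detruecase line → Spec_detruecase line (detruecase line)

-- ===== LEMMAS AND PROOFS =====

-- structural recursion computing split on a single space, used to characterise splitOn
def sRec : List Char → List (List Char)
  | [] => [[]]
  | c :: rest => if c = ' ' then [] :: sRec rest else (sRec rest).modifyHead (c :: ·)

theorem sRec_ne_nil (s : List Char) : sRec s ≠ [] := by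
  induction s with
  | nil => simp [sRec]
  | cons c rest ih =>
    simp only [sRec]
    split
    · simp
    · cases h : sRec rest with
      | nil => exact absurd h ih
      | cons x xs => simp

theorem go_spec (fuel : Nat) (l cur : List Char) (acc : List (List Char)) (h : l.length ≤ fuel) :
    PySem.Chars.splitOn.go [' '] fuel l cur acc
      = acc.reverse ++ (sRec l).modifyHead (cur.reverse ++ ·) := by
  induction fuel generalizing l cur acc with
  | zero =>
    have : l = [] := by
      cases l with
      | nil => rfl
      | cons a b => simp at h
    subst this
    simp [PySem.Chars.splitOn.go, sRec]
  | succ fuel ih =>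
    cases l with
    | nil => simp [PySem.Chars.splitOn.go, sRec]
    | cons c rest =>
      by_cases hc : c = ' '
      · subst hc
        have hpre : [' '].isPrefixOf (' ' :: rest) = true := by simp [List.isPrefixOf]
        rw [show PySem.Chars.splitOn.go [' '] (fuel+1) (' ' :: rest) cur acc
            = PySem.Chars.splitOn.go [' '] fuel (List.drop [' '].length (' ' :: rest)) []
                (cur.reverse :: acc) from by simp [PySem.Chars.splitOn.go, hpre]]
        rw [ih _ _ _ (by simpa using Nat.le_of_succ_le_succ (by simpa using h))]
        simp [sRec]
        cases hs : sRec rest with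
        | nil => exact absurd hs (sRec_ne_nil rest)
        | cons x xs => simp
      · have hpre : [' '].isPrefixOf (c :: rest) = false := by
          simp [List.isPrefixOf]
          exact fun hh => absurd hh.symm hc
        rw [show PySem.Chars.splitOn.go [' '] (fuel+1) (c :: rest) cur acc
            = PySem.Chars.splitOn.go [' '] fuel rest (c :: cur) acc from by
          simp [PySem.Chars.splitOn.go, hpre]]
        rw [ih _ _ _ (by simpa using Nat.le_of_succ_le_succ (by simpa using h))]
        simp [sRec, hc]
        cases hs : sRec rest with
        | nil => exact absurd hs (sRec_ne_nil rest)
        | cons x xs => simp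

theorem splitOn_eq_sRec (s : List Char) : PySem.Chars.splitOn s [' '] = sRec s := by
  show PySem.Chars.splitOn.go [' '] (s.length + 1) s [] [] = sRec s
  rw [go_spec _ _ _ _ (Nat.le_succ _)]
  cases hs : sRec s with
  | nil => exact absurd hs (sRec_ne_nil s)
  | cons x xs => simp

theorem sRec_no_space (a : List Char) (ha : ' ' ∉ a) : sRec a = [a] := by
  induction a with
  | nil => rfl
  | cons c rest ih =>
    have hc : c ≠ ' ' := fun h => ha (h ▸ List.mem_cons_self)
    have : ' ' ∉ rest := fun h => ha (List.mem_cons_of_mem _ h)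
    simp [sRec, hc, ih this]

theorem sRec_append (a b : List Char) (ha : ' ' ∉ a) :
    sRec (a ++ ' ' :: b) = a :: sRec b := by
  induction a with
  | nil => simp [sRec]
  | cons c rest ih =>
    have hc : c ≠ ' ' := fun h => ha (h ▸ List.mem_cons_self)
    have : ' ' ∉ rest := fun h => ha (List.mem_cons_of_mem _ h)
    simp [sRec, hc, ih this]

theorem join_cons (x : List Char) (y : List (List Char)) (hy : y ≠ []) :
    PySem.Chars.join [' '] (x :: y) = x ++ ' ' :: PySem.Chars.join [' '] y := by
  cases y with
  | nil => exact absurd rfl hy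
  | cons z zs => simp [PySem.Chars.join_cons_cons]

theorem join_sRec (b : List Char) : PySem.Chars.join [' '] (sRec b) = b := by
  induction b with
  | nil => rfl
  | cons c rest ih =>
    by_cases hc : c = ' '
    · subst hc
      rw [show sRec (' ' :: rest) = [] :: sRec rest from by simp [sRec]]
      rw [join_cons _ _ (sRec_ne_nil rest), ih]
      rfl
    · rw [show sRec (c :: rest) = (sRec rest).modifyHead (c :: ·) from by simp [sRec, hc]]
      cases hs : sRec rest with
      | nil => exact absurd hs (sRec_ne_nil rest)
      | cons x xs =>
        rw [hs] at ih
        have hstep : PySem.Chars.join [' '] ((c :: x) :: xs) = c :: PySem.Chars.join [' '] (x :: xs) := by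
          cases xs with
          | nil => simp [PySem.Chars.join_singleton]
          | cons z zs => simp [PySem.Chars.join_cons_cons]
        simpa [List.modifyHead, hstep] using congrArg (c :: ·) ih

theorem pvLoopA_true (ts : List (List Char)) : pvLoopA ts true = ts := by
  induction ts with
  | nil => rfl
  | cons t ts ih => simp [pvLoopA, ih]

theorem pvLoopA_ne_nil (ts : List (List Char)) (b : Bool) (h : ts ≠ []) : pvLoopA ts b ≠ [] := by
  cases ts with
  | nil => exact absurd rfl h
  | cons t ts => simp [pvLoopA]; split <;> simp

theorem singleton_infix_iff (s : List Char) : [' '] <:+: s ↔ ' ' ∈ s := by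
  constructor
  · intro h
    exact h.sublist.subset List.mem_cons_self
  · intro h
    obtain ⟨l, r, rfl⟩ := List.append_of_mem h
    exact ⟨l, r, by simp⟩

theorem main_lemma (n : Nat) : ∀ (rest done : List Char), rest.length ≤ n →
    pvGoB done rest = done ++ PySem.Chars.join [' '] (pvLoopA (sRec rest) false) := by
  induction n with
  | zero =>
    intro rest done h
    have : rest = [] := by cases rest with
      | nil => rfl
      | cons a b => simp at h
    subst this
    rw [pvGoB]
    have hfind : PySem.Chars.find ([] : List Char) [' '] = -1 := by decide
    simp [hfind, sRec, pvLoopA, PySem.Chars.join_singleton, PySem.Chars.strIsalpha]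
  | succ n ih =>
    intro rest done h
    rw [pvGoB]
    by_cases hneg : PySem.Chars.find rest [' '] < 0
    · -- no space in rest
      have hnot : ¬ [' '] <:+: rest := by
        have := PySem.Chars.find_nonneg_iff (s := rest) (sub := [' '])
        intro hc; have := this.mpr hc; omega
      have hmem : ' ' ∉ rest := fun hm => hnot ((singleton_infix_iff rest).mpr hm)
      rw [sRec_no_space rest hmem]
      by_cases halpha : PySem.Chars.strIsalpha rest = true
      · simp [hneg, halpha, pvLoopA, PySem.Chars.join_singleton]
      · simp [hneg, halpha, pvLoopA, PySem.Chars.join_singleton]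
    · -- space found at index k
      have h0 : (0 : Int) ≤ PySem.Chars.find rest [' '] := by omega
      have hin : [' '] <:+: rest :=
        (PySem.Chars.find_nonneg_iff (s := rest) (sub := [' '])).mp h0
      obtain ⟨hpre, hmin⟩ := PySem.Chars.find_spec (s := rest) (sub := [' ']) h0
      set k := (PySem.Chars.find rest [' ']).toNat with hk
      obtain ⟨t, ht⟩ : ∃ t, rest.drop k = ' ' :: t := by
        obtain ⟨t, ht⟩ := hpre
        exact ⟨t, by simpa using ht.symm⟩
      have hklt : k < rest.length := by
        by_contra hge
        rw [List.drop_eq_nil_of_le (by omega)] at ht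
        simp at ht
      have htd : t = rest.drop (k + 1) := by
        have : rest.drop (k + 1) = (rest.drop k).drop 1 := by
          rw [List.drop_drop]
        rw [this, ht]
        rfl
      have hsplit : rest = rest.take k ++ ' ' :: rest.drop (k + 1) := by
        conv_lhs => rw [← List.take_append_drop k rest]
        rw [ht, htd]
      have hnospace : ' ' ∉ rest.take k := by
        intro hm
        obtain ⟨i, hi, hgi⟩ := List.mem_take_iff_getElem.mp hm
        have hik : i < k := lt_of_lt_of_le hi (min_le_left _ _)
        have : [' '] <+: rest.drop i := by
          rw [List.drop_eq_getElem_cons (by omega)]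
          exact ⟨rest.drop (i+1), by simp [hgi]⟩
        exact hmin i hik this
      -- rewrite sRec rest
      have hs : sRec rest = rest.take k :: sRec (rest.drop (k + 1)) := by
        conv_lhs => rw [hsplit]
        exact sRec_append _ _ hnospace
      rw [hs]
      by_cases halpha : PySem.Chars.strIsalpha (rest.take k) = true
      · simp only [hneg, if_false, halpha, if_true, pvLoopA, Bool.not_false, Bool.true_and]
        rw [pvLoopA_true, join_cons _ _ (sRec_ne_nil _), join_sRec]
        simp
      · have hlen : (rest.drop (k + 1)).length ≤ n := by
          simp only [List.length_drop]
          omega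
        rw [ih _ _ hlen]
        simp only [if_neg hneg, dif_neg hneg]
        rw [if_neg halpha]
        simp only [pvLoopA, Bool.not_false, Bool.true_and]
        rw [if_neg halpha, join_cons _ _ (pvLoopA_ne_nil _ _ (sRec_ne_nil _))]
        simp

-- ===== VERDICT =====
theorem detruecase_spec : Claim_equal_detruecase := by
  intro line _
  show detruecase line = detruecase_alt line
  unfold detruecase detruecase_alt
  rw [splitOn_eq_sRec, main_lemma line.toList.length line.toList [] (le_refl _)]
  simp
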